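-- pv_equiv track=rewrite | github.com/wenlerrr/NLP | SourceCode/data_analysis.py | countObs
-- ===== SOURCE A (Python) =====
-- jjList = ['JJ', 'JJR', 'JJS']
--
-- def countObs(_StarReview):
--     _starDict = {}
--     for review in _StarReview:
--         set_of_adj = set()
--         for sentence in review:
--             for x in sentence:
--                 if x[1] in jjList:
--                     set_of_adj.add(x[0].lower())
--         for item in set_of_adj:
--             _starDict[item] = _starDict.get(item, 0) + 1
--     return _starDict
-- ===== SOURCE B (Python) =====
-- jjList = ['JJ', 'JJR', 'JJS']
--
-- def countObs(_StarReview):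
--     # one adjective-lemma set per review
--     sets = [{x[0].lower() for sentence in review for x in sentence if x[1] in jjList}
--             for review in _StarReview]
--     # distinct lemmas in first-appearance order; each counted by membership over the per-review sets
--     order = dict.fromkeys(k for s in sets for k in s)
--     return {k: sum(1 for s in sets if k in s) for k in order}
-- ===== Notes on version B (the rewrite author's own statement) =====
-- stated objective: alternative
-- what changed: Replaces A's incremental per-review counter dict (dedup set per review, then increment counts) by building all per-review adjective sets first and then, over the deduplicated lemma list, counting membership across those sets in a final mapping pass.
import Mathlib
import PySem

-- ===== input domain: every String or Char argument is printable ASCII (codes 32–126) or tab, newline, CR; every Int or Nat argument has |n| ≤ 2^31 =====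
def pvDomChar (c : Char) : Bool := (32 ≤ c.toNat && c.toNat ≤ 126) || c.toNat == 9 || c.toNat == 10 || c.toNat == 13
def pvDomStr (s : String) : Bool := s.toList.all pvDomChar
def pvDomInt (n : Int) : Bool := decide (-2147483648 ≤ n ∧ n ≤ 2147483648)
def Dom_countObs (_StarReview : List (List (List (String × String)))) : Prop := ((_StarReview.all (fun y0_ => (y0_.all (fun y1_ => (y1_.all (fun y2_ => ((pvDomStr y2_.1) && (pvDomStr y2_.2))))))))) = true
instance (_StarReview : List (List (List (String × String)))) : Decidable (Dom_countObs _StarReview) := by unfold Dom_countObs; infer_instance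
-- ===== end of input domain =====

-- B replaces A's incremental counter dict by building all per-review adjective sets first and
-- counting membership across them in a final mapping pass (objective: alternative, same cost).
-- The returned dict's key iteration order is hash-dependent in Python (A iterates a set);
-- both ports use first-insertion order and outputs are compared as dicts.

-- ===== PORT A =====
def jjList : List String := ["JJ", "JJR", "JJS"]

def countObs (_StarReview : List (List (List (String × String)))) : List (String × Int) :=
  (_StarReview.foldl (fun d review =>
      let set_of_adj : PySem.Set String :=
        review.foldl (fun s sentence =>
          sentence.foldl (fun s x =>
            if jjList.contains x.2 then PySem.Set.add s (PySem.Str.lower x.1) else s) s)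
          PySem.Set.empty
      set_of_adj.foldl (fun d item => PySem.Dict.modify d item 0 (· + 1)) d)
    PySem.Dict.empty).items

-- ===== PORT B =====
-- {x[0].lower() for sentence in review for x in sentence if x[1] in jjList}
def adjSet (review : List (List (String × String))) : PySem.Set String :=
  PySem.Set.ofList (review.flatMap (fun sentence =>
    sentence.filterMap (fun x =>
      if jjList.contains x.2 then some (PySem.Str.lower x.1) else none)))

def countObs_alt (_StarReview : List (List (List (String × String)))) : List (String × Int) :=
  let sets := _StarReview.map adjSet
  let order := PySem.List.dedup (sets.flatMap (fun s => s))
  order.map (fun k => (k, (sets.countP (fun s => decide (k ∈ s)) : Int)))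

-- ===== PRECONDITION & SPEC =====
def Spec_countObs (_StarReview : List (List (List (String × String)))) (out : List (String × Int)) : Prop := out = countObs_alt _StarReview
instance (_StarReview : List (List (List (String × String)))) (out : List (String × Int)) : Decidable (Spec_countObs _StarReview out) := by unfold Spec_countObs; infer_instance

-- ===== CLAIM (what is proved, stated in full; the proofs are below) =====
def Claim_equal_countObs : Prop := ∀ (_StarReview : List (List (List (String × String)))), Dom_countObs _StarReview → Spec_countObs _StarReview (countObs _StarReview)

-- ===== LEMMAS AND PROOFS =====

-- one sentence of A's inner loop = updating the set with the sentence's filtered lemmas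
theorem sentence_fold_eq (sentence : List (String × String)) (s : PySem.Set String) :
    sentence.foldl (fun s x =>
        if jjList.contains x.2 then PySem.Set.add s (PySem.Str.lower x.1) else s) s
      = PySem.Set.update s (sentence.filterMap (fun x =>
          if jjList.contains x.2 then some (PySem.Str.lower x.1) else none)) := by
  induction sentence generalizing s with
  | nil => simp [PySem.Set.update_nil]
  | cons x xs ih =>
    rw [List.foldl_cons, List.filterMap_cons]
    cases h : jjList.contains x.2 with
    | true =>
      simp only [reduceIte]
      rw [ih, PySem.Set.update_cons]
    | false =>
      simp only [Bool.false_eq_true, reduceIte]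
      exact ih s

-- A's whole set_of_adj for one review = B's adjSet
theorem setA_eq (review : List (List (String × String))) :
    review.foldl (fun s sentence =>
        sentence.foldl (fun s x =>
          if jjList.contains x.2 then PySem.Set.add s (PySem.Str.lower x.1) else s) s)
      PySem.Set.empty = adjSet review := by
  suffices H : ∀ (s : PySem.Set String),
      review.foldl (fun s sentence =>
        sentence.foldl (fun s x =>
          if jjList.contains x.2 then PySem.Set.add s (PySem.Str.lower x.1) else s) s) s
      = PySem.Set.update s (review.flatMap (fun sentence =>
          sentence.filterMap (fun x =>
            if jjList.contains x.2 then some (PySem.Str.lower x.1) else none))) by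
    simpa [adjSet, PySem.Set.update_empty] using H PySem.Set.empty
  induction review with
  | nil => intro s; simp [PySem.Set.update_nil]
  | cons r rs ih =>
    intro s
    rw [List.foldl_cons, ih, sentence_fold_eq, List.flatMap_cons,
      PySem.Set.update_append]

-- counting an element in a concatenation of duplicate-free lists = counting the lists containing it
theorem count_flatten (ss : List (List String)) (h : ∀ s ∈ ss, s.Nodup) (k : String) :
    (ss.flatten).count k = ss.countP (fun s => decide (k ∈ s)) := by
  induction ss with
  | nil => simp
  | cons s ss ih =>
    have hs : s.Nodup := h s (by simp)
    rw [List.flatten_cons, List.count_append, ih (fun t ht => h t (by simp [ht])),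
      List.countP_cons]
    by_cases hk : k ∈ s
    · rw [List.count_eq_one_of_mem hs hk]
      simp [hk]
      omega
    · rw [List.count_eq_zero.mpr hk]
      simp [hk]

theorem countObs_eq_items_counter (R : List (List (List (String × String)))) :
    countObs R = (PySem.Dict.counter ((R.map adjSet).flatten)).items := by
  unfold countObs
  simp only [setA_eq]
  rw [← List.foldl_map, ← List.foldl_flatten, PySem.Dict.counter_eq_foldl]

-- ===== VERDICT (by name: the statement is the Claim_ definition above) =====
theorem countObs_spec : Claim_equal_countObs := by
  intro R _
  unfold Spec_countObs
  rw [countObs_eq_items_counter, PySem.Dict.items_counter]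
  unfold countObs_alt
  simp only [PySem.List.dedup_eq_ofList]
  rw [List.flatMap_id']
  apply List.map_congr_left
  intro k _
  have hnd : ∀ s ∈ R.map adjSet, s.Nodup := by
    intro s hs
    rcases List.mem_map.mp hs with ⟨r, _, rfl⟩
    exact PySem.Set.nodup_ofList _
  rw [count_flatten _ hnd k]
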